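-- pv_equiv track=rewrite | github.com/rohanlad/Bias-in-AI | skww86.py | unique_value_data_structures
-- ===== SOURCE A (Python) =====
-- def unique_value_data_structures(columns):
--     sorted_lists = {}
--     index_lookups = {}
--     for column in columns:
--         sorted_list = []
--         for c in column:
--             if c not in sorted_list:
--                 sorted_list.append(c)
--         sorted_list = sorted(sorted_list)
--         sorted_lists[columns[column]] = sorted_list
--         index_lookup = {}
--         for val in sorted_list:
--             index_lookup[val] = sorted_list.index(val)
--         index_lookups[columns[column]] = index_lookup
--     return sorted_lists, index_lookups
-- ===== SOURCE B (Python) =====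
-- def unique_value_data_structures(columns):
--     sorted_lists = {}
--     index_lookups = {}
--     for column in columns:
--         sorted_list = []
--         index_lookup = {}
--         for c in sorted(column):
--             if not sorted_list or c != sorted_list[-1]:
--                 sorted_list.append(c)
--                 index_lookup[c] = len(sorted_list) - 1
--         sorted_lists[columns[column]] = sorted_list
--         index_lookups[columns[column]] = index_lookup
--     return sorted_lists, index_lookups
-- ===== Notes on version B (the rewrite author's own statement) =====
-- stated objective: alternative
-- what changed: Per column, instead of a membership-scan dedup pass followed by a sort of the deduped list and a separate pass calling list.index for every value, B sorts the raw column once and then does a single linear walk with adjacent-duplicate skipping that builds the unique sorted list and the value-to-index map together.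
import Mathlib
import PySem

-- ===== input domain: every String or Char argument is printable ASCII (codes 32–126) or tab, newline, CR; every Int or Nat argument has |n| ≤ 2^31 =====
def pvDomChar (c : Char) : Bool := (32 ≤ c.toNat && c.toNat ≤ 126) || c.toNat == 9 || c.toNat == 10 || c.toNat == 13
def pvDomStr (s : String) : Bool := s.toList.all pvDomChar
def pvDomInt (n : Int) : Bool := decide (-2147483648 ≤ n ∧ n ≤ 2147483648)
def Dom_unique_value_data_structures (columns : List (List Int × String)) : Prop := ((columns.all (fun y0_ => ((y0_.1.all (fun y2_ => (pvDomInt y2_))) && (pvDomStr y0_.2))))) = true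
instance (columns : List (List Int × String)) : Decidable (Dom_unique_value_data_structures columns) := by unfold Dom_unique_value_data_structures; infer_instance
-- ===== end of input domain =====

-- B merges dedup, sort and index-building into one sort plus one linear adjacent-dedup pass
-- (A scans for membership, sorts the deduped list, then calls list.index per value).

-- ===== PORT A =====
def unique_value_data_structures (columns : List (List Int × String)) : (List (String × List Int)) × (List (String × List (Int × Int))) :=
  let cdict : PySem.Dict (List Int) String := PySem.Dict.mk columns
  let res :=
    columns.foldl
      (fun (st : PySem.Dict String (List Int) × PySem.Dict String (PySem.Dict Int Int)) pr =>
        let column := pr.1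
        let sl0 : List Int := column.foldl (fun sl c => if c ∈ sl then sl else sl ++ [c]) []
        let sorted_list := PySem.List.sorted sl0 (fun x => x) false
        let name := cdict.getD column ""
        let index_lookup : PySem.Dict Int Int :=
          sorted_list.foldl
            (fun d val => d.insert val (((PySem.List.index? sorted_list val).getD 0 : Nat) : Int))
            PySem.Dict.empty
        (st.1.insert name sorted_list, st.2.insert name index_lookup))
      (PySem.Dict.empty, PySem.Dict.empty)
  (res.1.items, res.2.items.map (fun p => (p.1, p.2.items)))

-- ===== PORT B =====
-- inner loop of B: one pass over sorted(column) building (sorted_list, index_lookup) together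
def uvdsAltInner (column : List Int) : List Int × PySem.Dict Int Int :=
  (PySem.List.sorted column (fun x => x) false).foldl
    (fun (st : List Int × PySem.Dict Int Int) c =>
      if st.1 = [] ∨ PySem.List.pyGet? st.1 (-1) ≠ some c then
        (st.1 ++ [c], st.2.insert c (st.1.length : Int))
      else st)
    ([], PySem.Dict.empty)

def unique_value_data_structures_alt (columns : List (List Int × String)) : (List (String × List Int)) × (List (String × List (Int × Int))) :=
  let cdict : PySem.Dict (List Int) String := PySem.Dict.mk columns
  let res :=
    columns.foldl
      (fun (st : PySem.Dict String (List Int) × PySem.Dict String (PySem.Dict Int Int)) pr =>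
        let p := uvdsAltInner pr.1
        let name := cdict.getD pr.1 ""
        (st.1.insert name p.1, st.2.insert name p.2))
      (PySem.Dict.empty, PySem.Dict.empty)
  (res.1.items, res.2.items.map (fun p => (p.1, p.2.items)))

-- ===== PRECONDITION & SPEC =====
def Spec_unique_value_data_structures (columns : List (List Int × String)) (out : (List (String × List Int)) × (List (String × List (Int × Int)))) : Prop := out = unique_value_data_structures_alt columns
instance (columns : List (List Int × String)) (out : (List (String × List Int)) × (List (String × List (Int × Int)))) : Decidable (Spec_unique_value_data_structures columns out) := by unfold Spec_unique_value_data_structures; infer_instance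

-- ===== CLAIM (what is proved, stated in full; the proofs are below) =====
def Claim_equal_unique_value_data_structures : Prop := ∀ (columns : List (List Int × String)), Dom_unique_value_data_structures columns → Spec_unique_value_data_structures columns (unique_value_data_structures columns)

-- ===== LEMMAS AND PROOFS =====
def zipIdxMap (l : List Int) : List (Int × Int) := l.zipIdx.map (fun p => (p.1, (p.2 : Int)))

lemma zipIdxMap_append_singleton (l : List Int) (c : Int) :
    zipIdxMap (l ++ [c]) = zipIdxMap l ++ [(c, (l.length : Int))] := by
  simp [zipIdxMap, List.zipIdx_append]

lemma map_fst_zipIdxMap (l : List Int) : (zipIdxMap l).map (·.1) = l := by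
  rw [zipIdxMap, List.map_map]
  have h : ((fun x : Int × Int => x.1) ∘ fun p : Int × Nat => (p.1, (p.2 : Int))) = Prod.fst := rfl
  rw [h]
  exact List.zipIdx_map_fst 0 l

lemma pyGet_neg_one (d : List Int) : PySem.List.pyGet? d (-1) = d.getLast? := by
  cases d with
  | nil => rfl
  | cons a t =>
    simp only [PySem.List.pyGet?, PySem.List.pyIdx?]
    rw [if_neg (by norm_num), if_pos (by simp only [List.length_cons]; push_cast; omega)]
    simp [List.getLast?_eq_getElem?]

lemma mem_le_getLast : ∀ (d : List Int), d.Pairwise (· < ·) → ∀ x ∈ d, ∃ l, d.getLast? = some l ∧ x ≤ l := by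
  intro d
  induction d with
  | nil => intro _ x hx; cases hx
  | cons a t ih =>
    intro hp x hx
    cases t with
    | nil => simp at hx; exact ⟨a, rfl, le_of_eq hx⟩
    | cons b u =>
      rcases List.mem_cons.mp hx with h | h
      · obtain ⟨l, hl, hbl⟩ := ih hp.tail b List.mem_cons_self
        refine ⟨l, by rw [List.getLast?_cons_cons]; exact hl, ?_⟩
        subst h
        exact le_trans (le_of_lt (List.rel_of_pairwise_cons hp List.mem_cons_self)) hbl
      · obtain ⟨l, hl, hxl⟩ := ih hp.tail x h
        exact ⟨l, by rw [List.getLast?_cons_cons]; exact hl, hxl⟩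

lemma bfold_invariant (s : List Int) : ∀ (d : List Int) (idx : PySem.Dict Int Int),
    s.Pairwise (· ≤ ·) → d.Pairwise (· < ·) → (∀ x ∈ d, ∀ y ∈ s, x ≤ y) →
    idx.items = zipIdxMap d →
    (s.foldl
      (fun (st : List Int × PySem.Dict Int Int) c =>
        if st.1 = [] ∨ PySem.List.pyGet? st.1 (-1) ≠ some c then
          (st.1 ++ [c], st.2.insert c (st.1.length : Int))
        else st) (d, idx)).1.Pairwise (· < ·) ∧
    (∀ z, z ∈ (s.foldl
      (fun (st : List Int × PySem.Dict Int Int) c =>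
        if st.1 = [] ∨ PySem.List.pyGet? st.1 (-1) ≠ some c then
          (st.1 ++ [c], st.2.insert c (st.1.length : Int))
        else st) (d, idx)).1 ↔ z ∈ d ∨ z ∈ s) ∧
    (s.foldl
      (fun (st : List Int × PySem.Dict Int Int) c =>
        if st.1 = [] ∨ PySem.List.pyGet? st.1 (-1) ≠ some c then
          (st.1 ++ [c], st.2.insert c (st.1.length : Int))
        else st) (d, idx)).2.items = zipIdxMap (s.foldl
      (fun (st : List Int × PySem.Dict Int Int) c =>
        if st.1 = [] ∨ PySem.List.pyGet? st.1 (-1) ≠ some c then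
          (st.1 ++ [c], st.2.insert c (st.1.length : Int))
        else st) (d, idx)).1 := by
  induction s with
  | nil =>
    intro d idx _ h2 _ h4
    exact ⟨h2, fun z => by simp, h4⟩
  | cons c rest ih =>
    intro d idx h1 h2 h3 h4
    rw [List.foldl_cons]
    by_cases hc : d = [] ∨ PySem.List.pyGet? d (-1) ≠ some c
    · rw [if_pos hc]
      -- c is not already in d
      have hcd : c ∉ d := by
        intro hm
        obtain ⟨l, hl, hcl⟩ := mem_le_getLast d h2 c hm
        have hlc : l ≤ c := by
          have hlmem : l ∈ d := by
            have := List.getLast?_eq_some_iff.mp hl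
            obtain ⟨t, ht⟩ := this
            rw [ht]; exact List.mem_append_right _ List.mem_cons_self
          exact h3 l hlmem c List.mem_cons_self
        have heq : l = c := le_antisymm hlc hcl
        rw [heq] at hl
        rcases hc with h | h
        · rw [h] at hm; cases hm
        · exact h (by rw [pyGet_neg_one]; exact hl)
      have hnd : (d ++ [c]).Pairwise (· < ·) := by
        rw [List.pairwise_append]
        refine ⟨h2, List.pairwise_singleton _ _, ?_⟩
        intro x hx y hy
        have hyc : y = c := by simpa using hy
        rw [hyc]
        exact lt_of_le_of_ne (h3 x hx c List.mem_cons_self) (fun he => hcd (he ▸ hx))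
      have hkeys : idx.keys = d := by
        have : idx.keys = idx.items.map (·.1) := rfl
        rw [this, h4, map_fst_zipIdxMap]
      have hcontains : idx.contains c = false := by
        rw [PySem.Dict.contains_eq_decide_mem_keys, hkeys]
        exact decide_eq_false hcd
      have hitems : (idx.insert c (d.length : Int)).items = zipIdxMap (d ++ [c]) := by
        rw [PySem.Dict.items_insert_of_not_contains (h := hcontains), h4, zipIdxMap_append_singleton]
      have h3' : ∀ x ∈ d ++ [c], ∀ y ∈ rest, x ≤ y := by
        intro x hx y hy
        rcases List.mem_append.mp hx with h | h
        · exact h3 x h y (List.mem_cons_of_mem _ hy)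
        · simp at h; subst h
          exact List.rel_of_pairwise_cons h1 hy
      obtain ⟨r1, r2, r3⟩ := ih (d ++ [c]) (idx.insert c (d.length : Int)) h1.tail hnd h3' hitems
      refine ⟨r1, fun z => ?_, r3⟩
      rw [r2 z]
      simp [List.mem_append, List.mem_cons]
      tauto
    · rw [if_neg hc]
      rw [not_or, not_not] at hc
      obtain ⟨hne, hlast⟩ := hc
      have hcd : c ∈ d := by
        rw [pyGet_neg_one] at hlast
        obtain ⟨t, ht⟩ := List.getLast?_eq_some_iff.mp hlast
        rw [ht]; exact List.mem_append_right _ List.mem_cons_self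
      have h3' : ∀ x ∈ d, ∀ y ∈ rest, x ≤ y := fun x hx y hy => h3 x hx y (List.mem_cons_of_mem _ hy)
      obtain ⟨r1, r2, r3⟩ := ih d idx h1.tail h2 h3' h4
      refine ⟨r1, fun z => ?_, r3⟩
      rw [r2 z]
      simp [List.mem_cons]
      constructor
      · tauto
      · rintro (h | rfl | h) <;> tauto

lemma idx_some (l : List Int) (hn : l.Nodup) (i : Nat) (hl : i < l.length) :
    PySem.List.index? l l[i] = some i := by
  rw [PySem.List.index?_eq_some_iff]
  refine ⟨l.take i, l.drop (i+1), ?_, by simp [hl.le], ?_⟩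
  · conv_lhs => rw [← List.take_append_drop i l]
    rw [List.getElem_cons_drop]
  · intro hmem
    obtain ⟨j, hj, hji⟩ := List.getElem_of_mem hmem
    rw [List.getElem_take] at hji
    have heq := (List.Nodup.getElem_inj_iff hn).mp hji
    rw [List.length_take] at hj
    omega

lemma nodup_map_eq_zipIdxMap (l : List Int) (hn : l.Nodup) :
    l.map (fun val => (val, (((PySem.List.index? l val).getD 0 : Nat) : Int))) = zipIdxMap l := by
  apply List.ext_getElem
  · simp [zipIdxMap]
  · intro i h1 h2
    have hl : i < l.length := by simpa using h1
    simp only [List.getElem_map, zipIdxMap, List.getElem_zipIdx]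
    rw [idx_some l hn i hl]
    simp


lemma inner_eq (column : List Int) :
    (let sl0 : List Int := column.foldl (fun sl c => if c ∈ sl then sl else sl ++ [c]) []
     let sorted_list := PySem.List.sorted sl0 (fun x => x) false
     (sorted_list,
      sorted_list.foldl
        (fun (d : PySem.Dict Int Int) val => d.insert val (((PySem.List.index? sorted_list val).getD 0 : Nat) : Int))
        PySem.Dict.empty))
    = uvdsAltInner column := by
  have hsl0 : column.foldl (fun sl c => if c ∈ sl then sl else sl ++ [c]) [] = PySem.Set.ofList column := by
    rw [PySem.Set.ofList_eq_foldl]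
    apply PySem.List.foldl_congr_mem
    intro acc x _
    rw [PySem.Set.add_eq_ite]
  obtain ⟨r1, r2, r3⟩ := bfold_invariant (PySem.List.sorted column (fun x => x) false) [] PySem.Dict.empty
    (PySem.List.sorted_pairwise column (fun x => x)) List.Pairwise.nil (by intro x hx; cases hx) rfl
  set r := (PySem.List.sorted column (fun x => x) false).foldl
      (fun (st : List Int × PySem.Dict Int Int) c =>
        if st.1 = [] ∨ PySem.List.pyGet? st.1 (-1) ≠ some c then
          (st.1 ++ [c], st.2.insert c (st.1.length : Int))
        else st) ([], PySem.Dict.empty) with hr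
  have hmem : ∀ z, z ∈ r.1 ↔ z ∈ column := by
    intro z
    rw [r2 z]
    simp [PySem.List.mem_sorted]
  have hnodup : r.1.Nodup := r1.imp (fun h => ne_of_lt h)
  have hsorted : PySem.List.sorted (PySem.Set.ofList column) (fun x => x) false = r.1 := by
    apply PySem.List.sorted_eq_of_perm_of_pairwise_lt
    · rw [List.perm_ext_iff_of_nodup hnodup (PySem.Set.nodup_ofList column)]
      intro z
      rw [hmem z, PySem.Set.mem_ofList]
    · exact r1
  show _ = (r.1, r.2)
  rw [hsl0]
  dsimp only
  rw [hsorted]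
  refine Prod.ext rfl ?_
  show (r.1.foldl (fun (d : PySem.Dict Int Int) val => d.insert val (((PySem.List.index? r.1 val).getD 0 : Nat) : Int)) PySem.Dict.empty) = r.2
  apply PySem.Dict.ext
  have hfresh := PySem.Dict.items_foldl_insert_fresh (l := r.1) (k := fun a => a)
        (v := fun val => (((PySem.List.index? r.1 val).getD 0 : Nat) : Int)) (d := PySem.Dict.empty)
        (by intro a _; exact PySem.Dict.contains_empty a)
        (by simpa using hnodup)
  rw [hfresh, r3]
  rw [nodup_map_eq_zipIdxMap r.1 hnodup]
  simp [PySem.Dict.empty]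

-- ===== VERDICT (by name: the statement is the Claim_ definition above) =====
theorem unique_value_data_structures_spec : Claim_equal_unique_value_data_structures := by
  intro columns _
  unfold Spec_unique_value_data_structures
  unfold unique_value_data_structures unique_value_data_structures_alt
  dsimp only
  have h : columns.foldl
      (fun (st : PySem.Dict String (List Int) × PySem.Dict String (PySem.Dict Int Int)) pr =>
        let column := pr.1
        let sl0 : List Int := column.foldl (fun sl c => if c ∈ sl then sl else sl ++ [c]) []
        let sorted_list := PySem.List.sorted sl0 (fun x => x) false
        let name := (PySem.Dict.mk columns).getD column ""
        let index_lookup : PySem.Dict Int Int :=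
          sorted_list.foldl
            (fun d val => d.insert val (((PySem.List.index? sorted_list val).getD 0 : Nat) : Int))
            PySem.Dict.empty
        (st.1.insert name sorted_list, st.2.insert name index_lookup))
      (PySem.Dict.empty, PySem.Dict.empty)
      = columns.foldl
      (fun (st : PySem.Dict String (List Int) × PySem.Dict String (PySem.Dict Int Int)) pr =>
        let p := uvdsAltInner pr.1
        let name := (PySem.Dict.mk columns).getD pr.1 ""
        (st.1.insert name p.1, st.2.insert name p.2))
      (PySem.Dict.empty, PySem.Dict.empty) := by
    apply PySem.List.foldl_congr_mem
    intro acc pr _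
    dsimp only
    rw [← inner_eq pr.1]
  rw [h]
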